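-- pv_equiv track=rewrite | github.com/Vipul-Pandey-22/DSA-for-Data-Engineer | Stack/Questions/minimumCostToMakeValidString.py | minimumCostToMakeValidString
-- ===== SOURCE A (Python) =====
-- def minimumCostToMakeValidString(string):
--     if len(string) % 2 != 0:
--         return -1
--
--     stack = []
--     for i in string:
--         if i == '{':
--             stack.append(i)
--         else:
--
--             if stack and stack[-1] == '{':
--                 stack.pop()
--             else:
--                 stack.append(i)
--
--     a, b = 0, 0  # a = open braces, b = close braces
--     while stack:
--         if stack[-1] == '{':
--             b += 1
--         else:
--             a += 1
--         stack.pop()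
--
--     return (a + 1) // 2 + (b + 1) // 2
-- ===== SOURCE B (Python) =====
-- def minimumCostToMakeValidString(string):
--     if len(string) % 2 != 0:
--         return -1
--     bal = mn = 0
--     for ch in string:
--         bal += 1 if ch == '{' else -1
--         if bal < mn:
--             mn = bal
--     close = -mn
--     return (close + 1) // 2 + (bal + close + 1) // 2
-- ===== Notes on version B (the rewrite author's own statement) =====
-- stated objective: simpler
-- what changed: Replaces the stack-based pair cancellation and the second stack-draining counting loop with a prefix-balance computation: one pass tracks the running balance and its minimum, and the unmatched-close/open counts are recovered arithmetically (close = -min_prefix, open = balance + close).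
import Mathlib
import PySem

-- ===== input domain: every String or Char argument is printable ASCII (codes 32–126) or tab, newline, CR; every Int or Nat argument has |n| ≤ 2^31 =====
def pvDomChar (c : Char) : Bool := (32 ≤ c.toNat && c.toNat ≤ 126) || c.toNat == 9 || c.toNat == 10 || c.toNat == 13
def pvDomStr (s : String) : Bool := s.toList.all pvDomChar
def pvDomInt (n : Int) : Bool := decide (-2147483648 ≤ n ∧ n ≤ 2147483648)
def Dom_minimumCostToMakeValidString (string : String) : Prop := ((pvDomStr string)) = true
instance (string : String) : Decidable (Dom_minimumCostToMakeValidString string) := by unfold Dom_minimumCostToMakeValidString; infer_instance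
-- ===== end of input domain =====

-- B drops A's stack cancellation + second counting loop; it tracks the running balance and its
-- prefix minimum in one pass and recovers the unmatched counts arithmetically (simpler, O(1) space).

-- ===== PORT A =====
-- Python's list used as a stack is represented top-first: append = cons, stack[-1] = head?, pop = tail.
def pvStepA (st : List Char) (i : Char) : List Char :=
  if i == '{' then i :: st
  else if st ≠ [] ∧ st.head? = some '{' then st.tail
  else i :: st

-- the `while stack:` counting loop: a counts non-'{' tops, b counts '{' tops
def pvCountLoop : List Char → Int → Int → Int × Int
  | [], a, b => (a, b)
  | top :: rest, a, b =>
      if top = '{' then pvCountLoop rest a (b + 1) else pvCountLoop rest (a + 1) b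

def minimumCostToMakeValidString (string : String) : Int :=
  if PySem.Int.mod (string.toList.length : Int) 2 ≠ 0 then -1
  else
    let stack := string.toList.foldl pvStepA []
    let ab := pvCountLoop stack 0 0
    PySem.Int.floordiv (ab.1 + 1) 2 + PySem.Int.floordiv (ab.2 + 1) 2

-- ===== PORT B =====
-- state = (bal, mn); `bal += 1 if ch == '{' else -1; if bal < mn: mn = bal`
def pvStepB (p : Int × Int) (ch : Char) : Int × Int :=
  let b := p.1 + (if ch == '{' then 1 else -1)
  (b, if b < p.2 then b else p.2)

def minimumCostToMakeValidString_alt (string : String) : Int :=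
  if PySem.Int.mod (string.toList.length : Int) 2 ≠ 0 then -1
  else
    let bm := string.toList.foldl pvStepB (0, 0)
    let close := -bm.2
    PySem.Int.floordiv (close + 1) 2 + PySem.Int.floordiv (bm.1 + close + 1) 2

-- ===== PRECONDITION & SPEC =====
def Spec_minimumCostToMakeValidString (string : String) (out : Int) : Prop := out = minimumCostToMakeValidString_alt string
instance (string : String) (out : Int) : Decidable (Spec_minimumCostToMakeValidString string out) := by unfold Spec_minimumCostToMakeValidString; infer_instance

-- ===== CLAIM (what is proved, stated in full; the proofs are below) =====
def Claim_equal_minimumCostToMakeValidString : Prop := ∀ (string : String), Dom_minimumCostToMakeValidString string → Spec_minimumCostToMakeValidString string (minimumCostToMakeValidString string)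

-- ===== LEMMAS AND PROOFS =====

-- Invariant: A's stack is (unmatched opens) on top of (unmatched closes); B's state is
-- (opens - closes, -closes) — the running balance and its prefix minimum.
theorem pv_inv : ∀ (s : List Char) (o : Nat) (L : List Char),
    (∀ x ∈ L, x ≠ '{') →
    ∃ (o' : Nat) (L' : List Char), (∀ x ∈ L', x ≠ '{') ∧
      List.foldl pvStepA (List.replicate o '{' ++ L) s = List.replicate o' '{' ++ L' ∧
      List.foldl pvStepB ((o : Int) - (L.length : Int), -(L.length : Int)) s
        = ((o' : Int) - (L'.length : Int), -(L'.length : Int)) := by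
  intro s
  induction s with
  | nil => intro o L hL; exact ⟨o, L, hL, rfl, rfl⟩
  | cons c s ih =>
    intro o L hL
    simp only [List.foldl_cons]
    by_cases hc : c = '{'
    · subst hc
      have hA : pvStepA (List.replicate o '{' ++ L) '{' =
          List.replicate (o + 1) '{' ++ L := by
        simp [pvStepA, List.replicate_succ]
      have hB : pvStepB ((o : Int) - (L.length : Int), -(L.length : Int)) '{' =
          (((o + 1 : Nat) : Int) - (L.length : Int), -(L.length : Int)) := by
        have hcb : ('{' == '{') = true := rfl
        simp only [pvStepB, hcb, if_true, Prod.mk.injEq]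
        refine ⟨by push_cast; ring, ?_⟩
        rw [if_neg (by omega)]
      rw [hA, hB]; exact ih (o + 1) L hL
    · by_cases ho : o = 0
      · subst ho
        have hA : pvStepA (List.replicate 0 '{' ++ L) c =
            List.replicate 0 '{' ++ (c :: L) := by
          simp only [List.replicate, List.nil_append, pvStepA]
          rw [if_neg (by simpa using hc), if_neg]
          rintro ⟨hne, hhd⟩
          match L, hne with
          | x :: L', _ => exact hL x (by simp) (by simpa using hhd)
        have hB : pvStepB (((0 : Nat) : Int) - (L.length : Int), -(L.length : Int)) c =
            (((0 : Nat) : Int) - ((c :: L).length : Int), -(((c :: L).length : Int))) := by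
          have hcb : (c == '{') = false := by simpa using hc
          simp only [pvStepB, hcb, Bool.false_eq_true, if_false, List.length_cons,
            Prod.mk.injEq]
          refine ⟨by push_cast; ring, ?_⟩
          rw [if_pos (by push_cast; omega)]
          push_cast; ring
        rw [hA, hB]
        exact ih 0 (c :: L) (by
          intro x hx
          simp only [List.mem_cons] at hx
          rcases hx with rfl | hx
          · exact hc
          · exact hL x hx)
      · obtain ⟨o, rfl⟩ : ∃ k, o = k + 1 := ⟨o - 1, by omega⟩
        have hA : pvStepA (List.replicate (o + 1) '{' ++ L) c =
            List.replicate o '{' ++ L := by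
          simp [pvStepA, hc, List.replicate_succ]
        have hB : pvStepB (((o + 1 : Nat) : Int) - (L.length : Int), -(L.length : Int)) c =
            ((o : Int) - (L.length : Int), -(L.length : Int)) := by
          have hcb : (c == '{') = false := by simpa using hc
          simp only [pvStepB, hcb, Bool.false_eq_true, if_false, Prod.mk.injEq]
          refine ⟨by push_cast; ring, ?_⟩
          rw [if_neg (by push_cast; omega)]
        rw [hA, hB]; exact ih o L hL

theorem pv_count_flat : ∀ (L : List Char), (∀ x ∈ L, x ≠ '{') → ∀ (a b : Int),
    pvCountLoop L a b = (a + (L.length : Int), b) := by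
  intro L
  induction L with
  | nil => intro _ a b; simp [pvCountLoop]
  | cons x L' ih =>
    intro hL a b
    have hx : x ≠ '{' := hL x (by simp)
    rw [pvCountLoop, if_neg hx, ih (fun y hy => hL y (by simp [hy])) (a + 1) b]
    simp only [Prod.mk.injEq, List.length_cons]
    constructor
    · push_cast; ring
    · trivial

theorem pv_countLoop_rep : ∀ (o : Nat) (L : List Char), (∀ x ∈ L, x ≠ '{') → ∀ (a b : Int),
    pvCountLoop (List.replicate o '{' ++ L) a b = (a + (L.length : Int), b + (o : Int)) := by
  intro o
  induction o with
  | zero =>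
    intro L hL a b
    simp only [List.replicate, List.nil_append, Nat.cast_zero, add_zero]
    exact pv_count_flat L hL a b
  | succ o iho =>
    intro L hL a b
    rw [List.replicate_succ, List.cons_append, pvCountLoop, if_pos rfl, iho L hL a (b + 1)]
    simp only [Prod.mk.injEq]
    constructor
    · trivial
    · push_cast; ring

-- ===== VERDICT (by name: the statement is the Claim_ definition above) =====
theorem minimumCostToMakeValidString_spec : Claim_equal_minimumCostToMakeValidString := by
  unfold Claim_equal_minimumCostToMakeValidString
  intro s _
  unfold Spec_minimumCostToMakeValidString
  unfold minimumCostToMakeValidString minimumCostToMakeValidString_alt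
  dsimp only
  split_ifs with h
  · rfl
  · obtain ⟨o', L', hL', hA, hB⟩ := pv_inv s.toList 0 [] (by simp)
    simp only [List.replicate, List.nil_append, List.length_nil, Nat.cast_zero,
      sub_zero, neg_zero] at hA hB
    rw [hA, hB, pv_countLoop_rep o' L' hL' 0 0]
    simp only [zero_add, neg_neg]
    have h1 : (o' : Int) - (L'.length : Int) + (L'.length : Int) = (o' : Int) := by ring
    rw [h1, add_comm]
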